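-- pv_equiv track=rewrite | github.com/TargetIt/toygpgpu | phase4_scoreboard/src/learning_console.py | mem_diff
-- ===== SOURCE A (Python) =====
-- def mem_diff(old, new):
--     """Return {addr: (old_val, new_val)} for changed memory entries."""
--     diff = {}
--     all_addrs = set(old.keys()) | set(new.keys())
--     for a in all_addrs:
--         old_v = old.get(a, 0)
--         new_v = new.get(a, 0)
--         if old_v != new_v:
--             diff[a] = (old_v, new_v)
--     return diff
-- ===== SOURCE B (Python) =====
-- def mem_diff(old, new):
--     """Return {addr: (old_val, new_val)} for changed memory entries.
--
--     Two scoped passes instead of one pass over the key union: addresses in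
--     `old` first, then addresses only in `new`.
--     """
--     diff = {}
--     for a, old_v in old.items():
--         new_v = new.get(a, 0)
--         if old_v != new_v:
--             diff[a] = (old_v, new_v)
--     for a, new_v in new.items():
--         if a not in old:
--             if new_v != 0:
--                 diff[a] = (0, new_v)
--     return diff
-- ===== Notes on version B (the rewrite author's own statement) =====
-- stated objective: alternative
-- what changed: Replaces the single pass over the union-of-keys set with two differently-scoped passes: one over old.items() comparing each value against new.get(a,0), and one over new.items() handling only addresses absent from old (compared against the default 0).
import Mathlib
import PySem

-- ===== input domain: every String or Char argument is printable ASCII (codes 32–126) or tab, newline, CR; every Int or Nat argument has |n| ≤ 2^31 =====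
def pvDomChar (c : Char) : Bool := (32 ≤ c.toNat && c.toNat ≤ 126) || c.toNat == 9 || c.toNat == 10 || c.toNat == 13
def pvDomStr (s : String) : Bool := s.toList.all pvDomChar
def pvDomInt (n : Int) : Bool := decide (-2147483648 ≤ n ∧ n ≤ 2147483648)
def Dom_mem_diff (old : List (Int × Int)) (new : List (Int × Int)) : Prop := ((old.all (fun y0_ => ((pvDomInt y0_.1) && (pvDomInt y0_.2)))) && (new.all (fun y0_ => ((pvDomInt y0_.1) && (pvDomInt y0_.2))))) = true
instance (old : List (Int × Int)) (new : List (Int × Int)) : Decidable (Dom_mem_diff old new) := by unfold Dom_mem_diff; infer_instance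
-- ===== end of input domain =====

-- B replaces A's single pass over the union-of-keys set by two scoped passes
-- (old's addresses, then new-only addresses): a different decomposition, same cost.
-- Python iterates its set in hash order; the resulting dict is compared
-- order-insensitively, so the ports use first-insertion order for the set.


-- ===== PORT A =====
def mem_diff (old : List (Int × Int)) (new : List (Int × Int)) : List (Int × Int × Int) :=
  let oldD := PySem.Dict.mk old
  let newD := PySem.Dict.mk new
  -- all_addrs = set(old.keys()) | set(new.keys())
  let allAddrs : PySem.Set Int :=
    PySem.Set.union (PySem.Set.ofList oldD.keys) (PySem.Set.ofList newD.keys)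
  (allAddrs.foldl (fun diff a =>
      let old_v := oldD.getD a 0
      let new_v := newD.getD a 0
      if old_v ≠ new_v then diff.insert a (old_v, new_v) else diff)
    PySem.Dict.empty).items

-- ===== PORT B =====
def mem_diff_alt (old : List (Int × Int)) (new : List (Int × Int)) : List (Int × Int × Int) :=
  -- pass 1: addresses present in old
  let d1 := old.foldl (fun diff p =>
      let new_v := (PySem.Dict.mk new).getD p.1 0
      if p.2 ≠ new_v then diff.insert p.1 (p.2, new_v) else diff)
    PySem.Dict.empty
  -- pass 2: addresses present only in new
  (new.foldl (fun diff p =>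
      if (PySem.Dict.mk old).contains p.1 then diff
      else if p.2 ≠ 0 then diff.insert p.1 (0, p.2) else diff)
    d1).items

-- ===== PRECONDITION & SPEC =====
-- Pre_ restricts the association lists to distinct keys: exactly the lists that
-- represent a Python dict (a dict never has duplicate keys), the declared input type.
def Pre_mem_diff (old : List (Int × Int)) (new : List (Int × Int)) : Prop :=
  (old.map Prod.fst).Nodup ∧ (new.map Prod.fst).Nodup
instance (old : List (Int × Int)) (new : List (Int × Int)) : Decidable (Pre_mem_diff old new) := by unfold Pre_mem_diff; infer_instance
def pvWitness_mem_diff : (List (Int × Int)) × (List (Int × Int)) := ([(1, 2), (3, 0)], [(1, 5)])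

def Spec_mem_diff (old : List (Int × Int)) (new : List (Int × Int)) (out : List (Int × Int × Int)) : Prop := out = mem_diff_alt old new
instance (old : List (Int × Int)) (new : List (Int × Int)) (out : List (Int × Int × Int)) : Decidable (Spec_mem_diff old new out) := by unfold Spec_mem_diff; infer_instance

-- ===== CLAIM (what is proved, stated in full; the proofs are below) =====
def Claim_equal_mem_diff : Prop := ∀ (old : List (Int × Int)) (new : List (Int × Int)), Dom_mem_diff old new → Pre_mem_diff old new → Spec_mem_diff old new (mem_diff old new)

-- ===== LEMMAS AND PROOFS =====

/-- A conditional-insert loop over distinct fresh keys appends its hits. -/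
lemma items_foldl_condinsert {α : Type} (k : α → Int) (v : α → Int × Int)
    (c : α → Prop) [DecidablePred c] (L : List α) (d : PySem.Dict Int (Int × Int))
    (hfresh : ∀ p ∈ L, c p → d.contains (k p) = false)
    (hnd : (L.map k).Nodup) :
    (L.foldl (fun diff p => if c p then diff.insert (k p) (v p) else diff) d).items
      = d.items ++ L.filterMap (fun p => if c p then some (k p, v p) else none) := by
  induction L generalizing d with
  | nil => simp
  | cons p L ih =>
    simp only [List.map_cons, List.nodup_cons] at hnd
    by_cases hc : c p
    · have hfr : ∀ q ∈ L, c q → (d.insert (k p) (v p)).contains (k q) = false := by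
        intro q hq hcq
        rw [PySem.Dict.contains_insert]
        have hne : k q ≠ k p := fun h => hnd.1 (h ▸ List.mem_map_of_mem hq)
        simp [hne, hfresh q (List.mem_cons_of_mem _ hq) hcq]
      have hins := PySem.Dict.items_insert_of_not_contains (d := d) (k := k p) (v := v p)
        (hfresh p List.mem_cons_self hc)
      simp only [List.foldl_cons, List.filterMap_cons, if_pos hc,
        ih (d.insert (k p) (v p)) hfr hnd.2, hins, List.append_assoc, List.cons_append,
        List.nil_append]
    · simp only [List.foldl_cons, List.filterMap_cons, if_neg hc,
        ih d (fun q hq hcq => hfresh q (List.mem_cons_of_mem _ hq) hcq) hnd.2]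

/-- The diff-entry function both programs compute per address. -/
def diffEntry (old new : List (Int × Int)) (a : Int) : Option (Int × Int × Int) :=
  let ov := (PySem.Dict.mk old).getD a 0
  let nv := (PySem.Dict.mk new).getD a 0
  if ov ≠ nv then some (a, ov, nv) else none

lemma mem_diff_eq_filterMap (old new : List (Int × Int))
    (ho : (old.map Prod.fst).Nodup) (hn : (new.map Prod.fst).Nodup) :
    mem_diff old new
      = (old.map Prod.fst ++ (new.map Prod.fst).filter
          (fun y => !(PySem.Set.contains (old.map Prod.fst) y))).filterMap
          (diffEntry old new) := by
  have hkeys : PySem.Set.union (PySem.Set.ofList (PySem.Dict.keys (PySem.Dict.mk old)))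
      (PySem.Set.ofList (PySem.Dict.keys (PySem.Dict.mk new)))
      = old.map Prod.fst ++ (new.map Prod.fst).filter
          (fun y => !(PySem.Set.contains (old.map Prod.fst) y)) := by
    show PySem.Set.update (PySem.Set.ofList (old.map Prod.fst))
        (PySem.Set.ofList (new.map Prod.fst)) = _
    rw [PySem.Set.ofList_eq_self_of_nodup _ ho, PySem.Set.ofList_eq_self_of_nodup _ hn,
      PySem.Set.update_eq_append_filter, PySem.Set.ofList_eq_self_of_nodup _ hn]
  have hndL : ((old.map Prod.fst ++ (new.map Prod.fst).filter
      (fun y => !(PySem.Set.contains (old.map Prod.fst) y))).map id).Nodup := by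
    rw [List.map_id]
    refine List.Nodup.append ho (hn.filter _) ?_
    intro x hx hx'
    rw [List.mem_filter] at hx'
    simp at hx'
    obtain ⟨p, hp, rfl⟩ := List.mem_map.1 hx
    exact hx'.2 p.2 (by simpa using hp)
  unfold mem_diff
  simp only [hkeys]
  rw [items_foldl_condinsert (k := fun a => a) (v := fun a =>
        ((PySem.Dict.mk old).getD a 0, (PySem.Dict.mk new).getD a 0))
      (c := fun a => (PySem.Dict.mk old).getD a 0 ≠ (PySem.Dict.mk new).getD a 0)
      _ PySem.Dict.empty (by intro p _ _; exact PySem.Dict.contains_empty _) hndL]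
  simp [diffEntry, PySem.Dict.empty]

lemma mem_diff_alt_eq_filterMap (old new : List (Int × Int))
    (ho : (old.map Prod.fst).Nodup) (hn : (new.map Prod.fst).Nodup) :
    mem_diff_alt old new
      = old.filterMap (fun p => diffEntry old new p.1)
        ++ new.filterMap (fun p =>
            if (PySem.Dict.mk old).contains p.1 then none else diffEntry old new p.1) := by
  have hd1 : (old.foldl (fun diff p =>
        let new_v := (PySem.Dict.mk new).getD p.1 0
        if p.2 ≠ new_v then diff.insert p.1 (p.2, new_v) else diff)
      PySem.Dict.empty).items
      = old.filterMap (fun p =>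
          if p.2 ≠ (PySem.Dict.mk new).getD p.1 0
          then some (p.1, (p.2, (PySem.Dict.mk new).getD p.1 0)) else none) := by
    rw [items_foldl_condinsert (k := Prod.fst)
        (v := fun p => (p.2, (PySem.Dict.mk new).getD p.1 0))
        (c := fun p => p.2 ≠ (PySem.Dict.mk new).getD p.1 0)
        _ PySem.Dict.empty (by intro p _ _; exact PySem.Dict.contains_empty _) ho]
    simp [PySem.Dict.empty]
  have hbody : (fun (diff : PySem.Dict Int (Int × Int)) (p : Int × Int) =>
        if (PySem.Dict.mk old).contains p.1 then diff
        else if p.2 ≠ 0 then diff.insert p.1 (0, p.2) else diff)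
      = fun diff p =>
        if ¬ ((PySem.Dict.mk old).contains p.1 = true) ∧ p.2 ≠ 0
        then diff.insert p.1 (0, p.2) else diff := by
    funext diff p
    by_cases h1 : (PySem.Dict.mk old).contains p.1 = true <;>
      by_cases h2 : p.2 = (0 : Int) <;> simp [h1, h2]
  unfold mem_diff_alt
  simp only [hbody]
  rw [items_foldl_condinsert (k := Prod.fst) (v := fun p => ((0 : Int), p.2))
      (c := fun p => ¬ ((PySem.Dict.mk old).contains p.1 = true) ∧ p.2 ≠ 0)
      new _ ?_ hn]
  · congr 1
    · -- pass 1 produces the old-side entries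
      rw [hd1]
      refine List.filterMap_congr ?_
      intro p hp
      have hov : (PySem.Dict.mk old).getD p.1 0 = p.2 :=
        PySem.Dict.getD_of_mem_items _ (by simpa using hp) (by simpa using ho) 0
      simp [diffEntry, hov]
    · -- pass 2 produces the new-only entries
      refine List.filterMap_congr ?_
      intro p hp
      by_cases h1 : (PySem.Dict.mk old).contains p.1 = true
      · simp [h1]
      · have hov : (PySem.Dict.mk old).getD p.1 0 = 0 :=
          PySem.Dict.getD_of_not_contains _ 0 (Bool.eq_false_iff.mpr h1)
        have hnv : (PySem.Dict.mk new).getD p.1 0 = p.2 :=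
          PySem.Dict.getD_of_mem_items _ (by simpa using hp) (by simpa using hn) 0
        by_cases h2 : p.2 = (0 : Int) <;> simp [diffEntry, h1, h2, hov, hnv, ne_comm]
  · -- freshness of pass-2 keys w.r.t. the pass-1 dict
    intro p hp hcp
    refine Bool.eq_false_iff.mpr fun hcon => ?_
    have hk : p.1 ∈ (old.foldl (fun diff p =>
        let new_v := (PySem.Dict.mk new).getD p.1 0
        if p.2 ≠ new_v then diff.insert p.1 (p.2, new_v) else diff)
      PySem.Dict.empty).keys := (PySem.Dict.contains_iff_mem_keys _ _).mp hcon
    have hkeys : (old.foldl (fun diff p =>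
        let new_v := (PySem.Dict.mk new).getD p.1 0
        if p.2 ≠ new_v then diff.insert p.1 (p.2, new_v) else diff)
      PySem.Dict.empty).keys = ((old.filterMap (fun p =>
          if p.2 ≠ (PySem.Dict.mk new).getD p.1 0
          then some (p.1, (p.2, (PySem.Dict.mk new).getD p.1 0)) else none)).map Prod.fst) := by
      rw [← hd1]; rfl
    rw [hkeys] at hk
    obtain ⟨e, he, hef⟩ := List.mem_map.1 hk
    obtain ⟨q, hq, hqe⟩ := List.mem_filterMap.1 he
    have hq1 : q.1 = p.1 := by
      by_cases hg : q.2 ≠ (PySem.Dict.mk new).getD q.1 0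
      · rw [if_pos hg] at hqe
        cases hqe; simpa using hef
      · rw [if_neg hg] at hqe; cases hqe
    exact hcp.1 ((PySem.Dict.contains_iff_mem_keys _ _).mpr
      (by simpa [hq1] using List.mem_map_of_mem (f := Prod.fst) hq))

-- ===== VERDICT (by name: the statement is the Claim_ definition above) =====
theorem mem_diff_spec : Claim_equal_mem_diff := by
  intro old new _ hpre
  unfold Spec_mem_diff
  rw [mem_diff_eq_filterMap old new hpre.1 hpre.2,
      mem_diff_alt_eq_filterMap old new hpre.1 hpre.2,
      List.filterMap_append]
  congr 1
  · rw [List.filterMap_map]; rfl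
  · rw [List.filterMap_filter, List.filterMap_map]
    refine List.filterMap_congr ?_
    intro p hp
    by_cases hm : p.1 ∈ old.map Prod.fst
    · obtain ⟨q, hq, hq1⟩ := List.mem_map.1 hm
      have ha : (old.any fun r => r.1 == p.1) = true :=
        List.any_eq_true.mpr ⟨q, hq, by simp [hq1]⟩
      simp [Function.comp, hm, ha]
    · have ha : (old.any fun r => r.1 == p.1) = false := by
        refine Bool.eq_false_iff.mpr fun hx => ?_
        obtain ⟨q, hq, hq1⟩ := List.any_eq_true.mp hx
        exact hm (List.mem_map.2 ⟨q, hq, by simpa using hq1⟩)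
      simp [Function.comp, hm, ha]
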